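-- pv_equiv track=rewrite | github.com/Wipqozn113/adventofcode | 2021/day24/p1.py | GroupCommands
-- ===== SOURCE A (Python) =====
-- def GroupCommands(commands):
--     gcomms = []
--     gcomm = []
--     for command in commands:
--         comm = command[:3]
--         if comm == "inp" and len(gcomm) > 0:
--             gcomms.append(gcomm)
--             gcomm = []
--
--         gcomm.append(command)
--
--     gcomms.append(gcomm)
--
--     return gcomms
-- ===== SOURCE B (Python) =====
-- def GroupCommands(commands):
--     # Two-pass index-and-slice: gather the positions of the 'inp' commands
--     # (the first command never opens a new group), then cut the list there.
--     bounds = [i for i, c in enumerate(commands) if c[:3] == "inp" and i > 0]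
--     starts = [0] + bounds
--     ends = bounds + [len(commands)]
--     return [commands[s:e] for s, e in zip(starts, ends)]
-- ===== Notes on version B (the rewrite author's own statement) =====
-- stated objective: alternative
-- what changed: B replaces A's accumulate-and-flush loop by a two-pass index-and-slice scheme: first collect the group-boundary indices with a comprehension, then produce the groups by slicing between consecutive boundaries.
import Mathlib
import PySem

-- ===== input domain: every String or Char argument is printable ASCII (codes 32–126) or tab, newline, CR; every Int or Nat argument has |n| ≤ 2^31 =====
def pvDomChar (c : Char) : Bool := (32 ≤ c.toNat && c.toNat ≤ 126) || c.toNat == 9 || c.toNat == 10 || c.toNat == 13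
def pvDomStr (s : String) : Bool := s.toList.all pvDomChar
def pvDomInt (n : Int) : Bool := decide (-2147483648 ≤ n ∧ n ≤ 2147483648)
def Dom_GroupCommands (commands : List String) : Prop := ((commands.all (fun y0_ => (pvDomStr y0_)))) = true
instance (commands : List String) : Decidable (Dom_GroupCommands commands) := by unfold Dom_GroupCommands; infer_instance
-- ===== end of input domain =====

-- B reshapes A's accumulate-and-flush loop into boundary-index gathering followed by slicing; same results as A.

-- ===== PORT A =====
-- loop body of A: comm = command[:3]; flush gcomm when comm == "inp" and gcomm is nonempty; append command
def stepA (s : List (List String) × List String) (command : String) :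
    List (List String) × List String :=
  let comm := PySem.Str.slice command none (some 3)
  if comm == "inp" && decide (0 < s.2.length) then (s.1 ++ [s.2], [command])
  else (s.1, s.2 ++ [command])

def GroupCommands (commands : List String) : List (List String) :=
  let r := commands.foldl stepA (([] : List (List String)), ([] : List String))
  r.1 ++ [r.2]

-- ===== PORT B =====
-- B's comprehension filter: c[:3] == "inp" and i > 0, with p = (i, c) from enumerate(commands)
def inpAt (p : Int × String) : Bool :=
  PySem.Str.slice p.2 none (some 3) == "inp" && decide (0 < p.1)

def GroupCommands_alt (commands : List String) : List (List String) :=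
  let bounds := ((PySem.List.enumerate commands).filter inpAt).map Prod.fst
  let starts := (0 : Int) :: bounds
  let ends := bounds ++ [(commands.length : Int)]
  (starts.zip ends).map (fun p => PySem.List.slice commands (some p.1) (some p.2))

-- ===== PRECONDITION & SPEC =====
def Spec_GroupCommands (commands : List String) (out : List (List String)) : Prop := out = GroupCommands_alt commands
instance (commands : List String) (out : List (List String)) : Decidable (Spec_GroupCommands commands out) := by unfold Spec_GroupCommands; infer_instance

-- ===== CLAIM (what is proved, stated in full; the proofs are below) =====
def Claim_equal_GroupCommands : Prop := ∀ (commands : List String), Dom_GroupCommands commands → Spec_GroupCommands commands (GroupCommands commands)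

-- ===== LEMMAS AND PROOFS =====

-- the boundary indices B's first pass computes
def bnds (cs : List String) : List Int :=
  ((PySem.List.enumerate cs).filter inpAt).map Prod.fst

lemma bnds_mem {cs : List String} {b : Int} (h : b ∈ bnds cs) :
    0 < b ∧ b < cs.length := by
  unfold bnds at h
  simp only [List.mem_map, List.mem_filter, PySem.List.mem_enumerate_iff] at h
  obtain ⟨p, ⟨⟨k, hk, hp⟩, hf⟩, hb⟩ := h
  subst hp hb
  unfold inpAt at hf
  simp at hf ⊢
  omega

lemma bnds_snoc (cs : List String) (c : String) :
    bnds (cs ++ [c]) = bnds cs ++ (if inpAt ((cs.length : Int), c) then [(cs.length : Int)] else []) := by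
  unfold bnds
  rw [PySem.List.enumerate_append]
  rw [List.filter_append, List.map_append]
  congr 1
  simp [PySem.List.enumerate_cons, PySem.List.enumerate_nil, List.filter]
  split_ifs with h <;> simp_all

-- zip of a one-longer first list: the extra trailing element pairs with nothing
lemma zip_longer {α : Type} (a : α) (bs : List α) (z : α) :
    (a :: bs).zip (bs ++ [z]) = (a :: bs).zip bs ++ [((a :: bs).getLast (List.cons_ne_nil a bs), z)] := by
  induction bs generalizing a with
  | nil => rfl
  | cons b bs ih => simpa using ih b

lemma zip_snoc_both {α : Type} (a : α) (bs : List α) (z : α) :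
    ((a :: bs) ++ [z]).zip (bs ++ [z])
      = (a :: bs).zip bs ++ [((a :: bs).getLast (List.cons_ne_nil a bs), z)] := by
  induction bs generalizing a with
  | nil => rfl
  | cons b bs ih => simpa using ih b

-- loop invariant for A, phrased through B's boundary indices:
-- the flushed groups are the inter-boundary segments, the pending group is the tail after the last boundary
lemma invA (cs : List String) :
    cs.foldl stepA (([] : List (List String)), ([] : List String)) =
      (((((0 : Int) :: bnds cs).zip (bnds cs)).map
          (fun p => (cs.drop p.1.toNat).take (p.2.toNat - p.1.toNat))),
       cs.drop (((0 : Int) :: bnds cs).getLast (List.cons_ne_nil 0 (bnds cs))).toNat) := by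
  induction cs using List.reverseRecOn with
  | nil => simp [bnds, PySem.List.enumerate_nil]
  | append_singleton cs c ih =>
    rw [List.foldl_append, ih]
    have hLmem := List.getLast_mem (List.cons_ne_nil (0 : Int) (bnds cs))
    set L := ((0 : Int) :: bnds cs).getLast (List.cons_ne_nil 0 (bnds cs)) with hLdef
    have hL1 : L.toNat ≤ cs.length ∧ (0 < cs.length → L.toNat < cs.length) := by
      rcases List.mem_cons.mp hLmem with h0 | hmem
      · simp [h0]
      · have := bnds_mem hmem; omega
    -- the old pairs slice entirely within cs, so appending to cs does not change them
    have hmapeq : ∀ (ds : List String),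
        (((0 : Int) :: bnds cs).zip (bnds cs)).map
            (fun p => ((cs ++ ds).drop p.1.toNat).take (p.2.toNat - p.1.toNat))
          = (((0 : Int) :: bnds cs).zip (bnds cs)).map
            (fun p => (cs.drop p.1.toNat).take (p.2.toNat - p.1.toNat)) := by
      intro ds
      apply List.map_congr_left
      intro p hp
      obtain ⟨hp1, hp2⟩ := List.of_mem_zip hp
      have h1 : p.1.toNat ≤ cs.length := by
        rcases List.mem_cons.mp hp1 with h0 | hmem
        · simp [h0]
        · have := bnds_mem hmem; omega
      have h2 : p.2.toNat ≤ cs.length := by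
        have := bnds_mem hp2; omega
      rw [List.drop_append_of_le_length h1, List.take_append_of_le_length (by simp; omega)]
    by_cases hc : (PySem.Str.slice c none (some 3) == "inp") ∧ 0 < cs.length
    · -- flush case: c opens a new group
      have hstep : stepA
          ((((0 : Int) :: bnds cs).zip (bnds cs)).map
            (fun p => (cs.drop p.1.toNat).take (p.2.toNat - p.1.toNat)),
           cs.drop L.toNat) c
          = ((((0 : Int) :: bnds cs).zip (bnds cs)).map
              (fun p => (cs.drop p.1.toNat).take (p.2.toNat - p.1.toNat)) ++ [cs.drop L.toNat],
             [c]) := by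
        have hlt : L.toNat < cs.length := hL1.2 hc.2
        unfold stepA
        simp [hc.1]
        omega
      rw [List.foldl_cons, List.foldl_nil, hstep]
      have hb : bnds (cs ++ [c]) = bnds cs ++ [(cs.length : Int)] := by
        rw [bnds_snoc]
        have : inpAt ((cs.length : Int), c) = true := by
          unfold inpAt; simp [hc.1]; exact_mod_cast hc.2
        simp [this]
      rw [hb]
      have hzip : ((0 : Int) :: (bnds cs ++ [(cs.length : Int)])).zip (bnds cs ++ [(cs.length : Int)])
          = ((0 : Int) :: bnds cs).zip (bnds cs) ++ [(L, (cs.length : Int))] := by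
        rw [show ((0 : Int) :: (bnds cs ++ [(cs.length : Int)])) = ((0 : Int) :: bnds cs) ++ [(cs.length : Int)] by simp,
            zip_snoc_both]
      rw [hzip, List.map_append, hmapeq [c]]
      simp only [Prod.mk.injEq]
      constructor
      · -- first components: the new last pair slices out exactly the pending group
        simp only [List.map_cons, List.map_nil]
        congr 1
        have hdrop : ((cs ++ [c]).drop L.toNat) = cs.drop L.toNat ++ [c] :=
          List.drop_append_of_le_length hL1.1
        rw [Int.toNat_natCast, hdrop, List.take_append_of_le_length (by simp),
            List.take_of_length_le (by simp)]
      · -- second component: the fresh pending group is [c]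
        have hlast : (((0 : Int) :: (bnds cs ++ [(cs.length : Int)])).getLast (List.cons_ne_nil _ _)) = (cs.length : Int) := by
          rw [List.getLast_cons (by simp)]
          exact List.getLast_append_singleton ..
        rw [hlast]
        simp
    · -- no flush: c extends the pending group
      have hstep : stepA
          ((((0 : Int) :: bnds cs).zip (bnds cs)).map
            (fun p => (cs.drop p.1.toNat).take (p.2.toNat - p.1.toNat)),
           cs.drop L.toNat) c
          = ((((0 : Int) :: bnds cs).zip (bnds cs)).map
              (fun p => (cs.drop p.1.toNat).take (p.2.toNat - p.1.toNat)),
             cs.drop L.toNat ++ [c]) := by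
        unfold stepA
        by_cases hi : (PySem.Str.slice c none (some 3) == "inp")
        · have hn : ¬ 0 < cs.length := fun h => hc ⟨hi, h⟩
          simp [hi]
          omega
        · simp [hi]
      rw [List.foldl_cons, List.foldl_nil, hstep]
      have hb : bnds (cs ++ [c]) = bnds cs := by
        rw [bnds_snoc]
        have : inpAt ((cs.length : Int), c) = false := by
          unfold inpAt
          by_cases hi : (PySem.Str.slice c none (some 3) == "inp")
          · have hn : cs.length = 0 := by by_contra h; exact hc ⟨hi, by omega⟩
            simp [hi, hn]
          · simp [hi]
        simp [this]
      rw [hb]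
      simp only [Prod.mk.injEq]
      constructor
      · exact (hmapeq [c]).symm
      · exact (List.drop_append_of_le_length hL1.1).symm

-- ===== VERDICT (by name: the statement is the Claim_ definition above) =====
theorem GroupCommands_spec : Claim_equal_GroupCommands := by
  intro cs _
  show (cs.foldl stepA ([], [])).1 ++ [(cs.foldl stepA ([], [])).2]
    = (((0 : Int) :: bnds cs).zip (bnds cs ++ [(cs.length : Int)])).map
        (fun p => PySem.List.slice cs (some p.1) (some p.2))
  rw [invA, zip_longer, List.map_append]
  set L := ((0 : Int) :: bnds cs).getLast (List.cons_ne_nil 0 (bnds cs)) with hLdef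
  have hL0 : 0 ≤ L := by
    rcases List.mem_cons.mp (List.getLast_mem (List.cons_ne_nil (0 : Int) (bnds cs))) with h0 | hmem
    · rw [hLdef, h0]
    · have := bnds_mem (hLdef ▸ hmem); omega
  congr 1
  · apply List.map_congr_left
    intro p hp
    obtain ⟨hp1, hp2⟩ := List.of_mem_zip hp
    have h1 : 0 ≤ p.1 := by
      rcases List.mem_cons.mp hp1 with h0 | hmem
      · simp [h0]
      · have := bnds_mem hmem; omega
    have h2 : 0 ≤ p.2 := by have := bnds_mem hp2; omega
    rw [PySem.List.slice_toNat _ h1 h2]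
  · simp only [List.map_cons, List.map_nil]
    congr 1
    rw [PySem.List.slice_toNat _ hL0 (by positivity), List.take_of_length_le (by simp)]
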